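-- pv_equiv track=rewrite | github.com/ChenSorry/LightSR | TAMamba_one.py | sass_hor
-- ===== SOURCE A (Python) =====
-- def sass_hor(hw_shape):
--     H, W = hw_shape
--     L = H * W
--     o1, o2 = [], []
--     d1, d2 = [], []
--     o1_inverse = [-1 for _ in range(L)]
--     o2_inverse = [-1 for _ in range(L)]
--
--     i, j = 0, 0
--     j_d = 'right'
--     while i < H:
--         assert j_d in ['right', 'left']
--         idx = i * W + j
--         o1_inverse[idx] = len(o1)
--         o1.append(idx)
--         if j_d == 'right':
--             if j < W - 1:
--                 j = j + 1
--                 d1.append(1)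
--             else:
--                 i = i + 1
--                 d1.append(3)
--                 j_d = 'left'
--         else:
--             if j > 0:
--                 j = j - 1
--                 d1.append(2)
--                 j_d = 'left'
--             else:
--                 i = i + 1
--                 d1.append(3)
--                 j_d = 'right'
--     d1 = [0] + d1[:-1]
--
--     if H % 2 == 1:
--             i, j = H - 1, W - 1
--             j_d = 'left'
--     else:
--         i, j = H - 1, 0
--         j_d = 'right'
--
--     while i > -1:
--         assert j_d in ['left', 'right']
--         idx = i * W + j
--         o2_inverse[idx] = len(o2)
--         o2.append(idx)
--         if j_d == 'right':
--             if j < W - 1: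
--                 j = j + 1
--                 d2.append(1)
--             else:
--                 i = i - 1
--                 d2.append(3)
--                 j_d = 'left'
--         else:
--             if j > 0:
--                     j = j -1
--                     d2.append(2)
--             else:
--                 i = i - 1
--                 d2.append(3)
--                 j_d = 'right'
--     d2 = [0] + d2[:-1]
--
--     return (tuple(o1), tuple(o2)), (tuple(o1_inverse), tuple(o2_inverse)), (tuple(d1), tuple(d2))
-- ===== SOURCE B (Python) =====
-- # B: row-by-row construction — enumerate each serpentine row directly and emit its
-- # moves as a block, instead of simulating the walk cell-by-cell with a direction state.
-- def sass_hor(hw_shape):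
--     H, W = hw_shape
--     L = H * W
--
--     def build(rows):
--         order = []
--         moves = []
--         inv = [-1] * L
--         for i, l2r in rows:
--             cols = range(W) if l2r else reversed(range(W))
--             step = 1 if l2r else 2
--             for j in cols:
--                 inv[i * W + j] = len(order)
--                 order.append(i * W + j)
--             moves.extend([step] * (W - 1))
--             moves.append(3)
--         d = [0] + moves[:-1]
--         return order, inv, d
--
--     o1, inv1, d1 = build([(i, i % 2 == 0) for i in range(H)])
--     o2, inv2, d2 = build([(i, i % 2 == 1) for i in reversed(range(H))])
--     return (tuple(o1), tuple(o2)), (tuple(inv1), tuple(inv2)), (tuple(d1), tuple(d2))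
-- ===== Notes on version B (the rewrite author's own statement) =====
-- stated objective: simpler
-- what changed: B enumerates each serpentine row directly (columns forward or reversed by row parity) and emits the per-row move block, instead of simulating the walk cell-by-cell with a mutable direction/position state machine; the second walk's rows are generated top row last with parity-flipped direction.
import Mathlib
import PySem

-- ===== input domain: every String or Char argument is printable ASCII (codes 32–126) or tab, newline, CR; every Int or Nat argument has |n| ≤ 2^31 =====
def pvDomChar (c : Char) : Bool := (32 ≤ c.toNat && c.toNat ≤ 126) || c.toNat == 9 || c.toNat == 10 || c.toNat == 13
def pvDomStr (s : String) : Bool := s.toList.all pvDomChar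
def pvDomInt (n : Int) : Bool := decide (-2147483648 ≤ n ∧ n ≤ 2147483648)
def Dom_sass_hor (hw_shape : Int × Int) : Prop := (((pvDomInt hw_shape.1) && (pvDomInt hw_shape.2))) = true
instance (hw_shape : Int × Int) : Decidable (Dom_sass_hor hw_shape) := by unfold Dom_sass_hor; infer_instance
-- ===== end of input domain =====

-- B replaces A's cell-by-cell serpentine walk (mutable direction/position state machine)
-- with a direct row-by-row enumeration; equivalence proved on Pre_ (A raises IndexError off it).


-- ===== PORT A =====
-- First while loop of A; the walk state (i, j, j_d) and the accumulators (o1, d1, o1_inverse)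
-- are the recursion state.  'dir = true' is j_d == 'right' (the recursive calls pass the value
-- j_d has in that branch of A).  o1_inverse[idx] = len(o1) is PySem.List.pySetD (the total form
-- of Python's list assignment; the index is in range on every input admitted by Pre_).
def sassLoop1 (H W : Int) (i j : Int) (dir : Bool) (o d inv : List Int) :
    List Int × List Int × List Int :=
  if h : i < H then
    let idx := i * W + j
    let inv' := PySem.List.pySetD inv idx (o.length : Int)
    let o' := o ++ [idx]
    if hdir : dir then
      if hj : j < W - 1 then sassLoop1 H W i (j + 1) true o' (d ++ [1]) inv'
      else sassLoop1 H W (i + 1) j false o' (d ++ [3]) inv'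
    else
      if hj : j > 0 then sassLoop1 H W i (j - 1) false o' (d ++ [2]) inv'
      else sassLoop1 H W (i + 1) j true o' (d ++ [3]) inv'
  else (o, d, inv)
termination_by ((H - i).toNat, if dir then (W - 1 - j).toNat else j.toNat)
decreasing_by
  all_goals first
    | (apply Prod.Lex.left; omega)
    | (apply Prod.Lex.right; simp_all <;> omega)

-- Second while loop of A ('while i > -1'); same body shape with i decreasing.
def sassLoop2 (H W : Int) (i j : Int) (dir : Bool) (o d inv : List Int) :
    List Int × List Int × List Int :=
  if h : i > -1 then
    let idx := i * W + j
    let inv' := PySem.List.pySetD inv idx (o.length : Int)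
    let o' := o ++ [idx]
    if hdir : dir then
      if hj : j < W - 1 then sassLoop2 H W i (j + 1) true o' (d ++ [1]) inv'
      else sassLoop2 H W (i - 1) j false o' (d ++ [3]) inv'
    else
      if hj : j > 0 then sassLoop2 H W i (j - 1) false o' (d ++ [2]) inv'
      else sassLoop2 H W (i - 1) j true o' (d ++ [3]) inv'
  else (o, d, inv)
termination_by ((i + 1).toNat, if dir then (W - 1 - j).toNat else j.toNat)
decreasing_by
  all_goals first
    | (apply Prod.Lex.left; omega)
    | (apply Prod.Lex.right; simp_all <;> omega)

def sass_hor (hw_shape : Int × Int) : (List Int × List Int) × (List Int × List Int) × (List Int × List Int) :=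
  let H := hw_shape.1
  let W := hw_shape.2
  let L := H * W
  -- [-1 for _ in range(L)] : a list of max(L,0) copies of -1
  let inv0 : List Int := List.replicate L.toNat (-1)
  let r1 := sassLoop1 H W 0 0 true [] [] inv0
  let o1 := r1.1
  let d1 := 0 :: r1.2.1.dropLast        -- d1 = [0] + d1[:-1]
  let o1inv := r1.2.2
  -- start state of the second walk
  let st : Int × Int × Bool :=
    if PySem.Int.mod H 2 == 1 then (H - 1, W - 1, false) else (H - 1, 0, true)
  let r2 := sassLoop2 H W st.1 st.2.1 st.2.2 [] [] inv0
  let o2 := r2.1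
  let d2 := 0 :: r2.2.1.dropLast        -- d2 = [0] + d2[:-1]
  let o2inv := r2.2.2
  ((o1, o2), (o1inv, o2inv), (d1, d2))

-- ===== PORT B =====
-- One row of Source B's build: the inner 'for j in cols' loop (appending to order and filling
-- inv), then the per-row move block 'moves += [step]*(W-1) + [3]'.
def sassRowB (W : Int) (st : List Int × List Int × List Int) (r : Int × Bool) :
    List Int × List Int × List Int :=
  let cols := if r.2 then PySem.List.pyRange 0 W 1 else (PySem.List.pyRange 0 W 1).reverse
  let step : Int := if r.2 then 1 else 2
  let p := cols.foldl
    (fun (st2 : List Int × List Int) j =>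
      (st2.1 ++ [r.1 * W + j], PySem.List.pySetD st2.2 (r.1 * W + j) (st2.1.length : Int)))
    (st.1, st.2.2)
  (p.1, st.2.1 ++ List.replicate (W - 1).toNat step ++ [3], p.2)

-- Source B's build(rows): fold the rows, then shift the moves: d = [0] + moves[:-1]
def sassBuild (W L : Int) (rows : List (Int × Bool)) : List Int × List Int × List Int :=
  let res := rows.foldl (sassRowB W) ([], [], List.replicate L.toNat (-1 : Int))
  (res.1, res.2.2, 0 :: res.2.1.dropLast)

def sass_hor_alt (hw_shape : Int × Int) : (List Int × List Int) × (List Int × List Int) × (List Int × List Int) :=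
  let H := hw_shape.1
  let W := hw_shape.2
  let L := H * W
  let rows1 := (PySem.List.pyRange 0 H 1).map (fun i => (i, PySem.Int.mod i 2 == 0))
  let rows2 := ((PySem.List.pyRange 0 H 1).reverse).map (fun i => (i, PySem.Int.mod i 2 == 1))
  let b1 := sassBuild W L rows1
  let b2 := sassBuild W L rows2
  ((b1.1, b2.1), (b1.2.1, b2.2.1), (b1.2.2, b2.2.2))

-- ===== PRECONDITION & SPEC =====
-- Pre_ excludes exactly the inputs where A raises: for H >= 1 and W <= 0 the inverse list
-- is shorter than the index 0 and 'o1_inverse[idx] = ...' raises IndexError.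
def Pre_sass_hor (hw_shape : Int × Int) : Prop := hw_shape.1 ≤ 0 ∨ 1 ≤ hw_shape.2
instance (hw_shape : Int × Int) : Decidable (Pre_sass_hor hw_shape) := by unfold Pre_sass_hor; infer_instance
def pvWitness_sass_hor : (Int × Int) := (3, 4)

def Spec_sass_hor (hw_shape : Int × Int) (out : (List Int × List Int) × (List Int × List Int) × (List Int × List Int)) : Prop := out = sass_hor_alt hw_shape
instance (hw_shape : Int × Int) (out : (List Int × List Int) × (List Int × List Int) × (List Int × List Int)) : Decidable (Spec_sass_hor hw_shape out) := by unfold Spec_sass_hor; infer_instance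

-- ===== CLAIM (what is proved, stated in full; the proofs are below) =====
def Claim_equal_sass_hor : Prop := ∀ (hw_shape : Int × Int), Dom_sass_hor hw_shape → Pre_sass_hor hw_shape → Spec_sass_hor hw_shape (sass_hor hw_shape)

-- ===== LEMMAS AND PROOFS =====

-- inv after writing positions p, p+1, ... at the successive indices of idxs
def fillInv (inv : List Int) (p : Int) (idxs : List Int) : List Int :=
  match idxs with
  | [] => inv
  | x :: xs => fillInv (PySem.List.pySetD inv x p) (p + 1) xs

-- one-step unfoldings of A's loops
theorem loop1_rc (H W i j : Int) (o d inv : List Int) (hi : i < H) (hj : j < W - 1) :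
    sassLoop1 H W i j true o d inv
      = sassLoop1 H W i (j + 1) true (o ++ [i * W + j]) (d ++ [1])
          (PySem.List.pySetD inv (i * W + j) (o.length : Int)) := by
  rw [sassLoop1]; rw [dif_pos hi, dif_pos (show (true:Bool) = true from rfl), dif_pos hj]

theorem loop1_rb (H W i j : Int) (o d inv : List Int) (hi : i < H) (hj : ¬ j < W - 1) :
    sassLoop1 H W i j true o d inv
      = sassLoop1 H W (i + 1) j false (o ++ [i * W + j]) (d ++ [3])
          (PySem.List.pySetD inv (i * W + j) (o.length : Int)) := by
  rw [sassLoop1]; rw [dif_pos hi, dif_pos (show (true:Bool) = true from rfl), dif_neg hj]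

theorem loop1_lc (H W i j : Int) (o d inv : List Int) (hi : i < H) (hj : j > 0) :
    sassLoop1 H W i j false o d inv
      = sassLoop1 H W i (j - 1) false (o ++ [i * W + j]) (d ++ [2])
          (PySem.List.pySetD inv (i * W + j) (o.length : Int)) := by
  rw [sassLoop1]
  rw [dif_pos hi]
  rw [dif_neg (show ¬((false:Bool) = true) from by decide)]
  rw [dif_pos hj]

theorem loop1_lb (H W i j : Int) (o d inv : List Int) (hi : i < H) (hj : ¬ j > 0) :
    sassLoop1 H W i j false o d inv
      = sassLoop1 H W (i + 1) j true (o ++ [i * W + j]) (d ++ [3])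
          (PySem.List.pySetD inv (i * W + j) (o.length : Int)) := by
  rw [sassLoop1]
  rw [dif_pos hi]
  rw [dif_neg (show ¬((false:Bool) = true) from by decide)]
  rw [dif_neg hj]

theorem loop2_rc (H W i j : Int) (o d inv : List Int) (hi : i > -1) (hj : j < W - 1) :
    sassLoop2 H W i j true o d inv
      = sassLoop2 H W i (j + 1) true (o ++ [i * W + j]) (d ++ [1])
          (PySem.List.pySetD inv (i * W + j) (o.length : Int)) := by
  rw [sassLoop2]; rw [dif_pos hi, dif_pos (show (true:Bool) = true from rfl), dif_pos hj]

theorem loop2_rb (H W i j : Int) (o d inv : List Int) (hi : i > -1) (hj : ¬ j < W - 1) :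
    sassLoop2 H W i j true o d inv
      = sassLoop2 H W (i - 1) j false (o ++ [i * W + j]) (d ++ [3])
          (PySem.List.pySetD inv (i * W + j) (o.length : Int)) := by
  rw [sassLoop2]; rw [dif_pos hi, dif_pos (show (true:Bool) = true from rfl), dif_neg hj]

theorem loop2_lc (H W i j : Int) (o d inv : List Int) (hi : i > -1) (hj : j > 0) :
    sassLoop2 H W i j false o d inv
      = sassLoop2 H W i (j - 1) false (o ++ [i * W + j]) (d ++ [2])
          (PySem.List.pySetD inv (i * W + j) (o.length : Int)) := by
  rw [sassLoop2]
  rw [dif_pos hi]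
  rw [dif_neg (show ¬((false:Bool) = true) from by decide)]
  rw [dif_pos hj]

theorem loop2_lb (H W i j : Int) (o d inv : List Int) (hi : i > -1) (hj : ¬ j > 0) :
    sassLoop2 H W i j false o d inv
      = sassLoop2 H W (i - 1) j true (o ++ [i * W + j]) (d ++ [3])
          (PySem.List.pySetD inv (i * W + j) (o.length : Int)) := by
  rw [sassLoop2]
  rw [dif_pos hi]
  rw [dif_neg (show ¬((false:Bool) = true) from by decide)]
  rw [dif_neg hj]

theorem sassRowB_inner (W i : Int) (cols : List Int) :
    ∀ (o inv : List Int),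
      cols.foldl
        (fun (st2 : List Int × List Int) j =>
          (st2.1 ++ [i * W + j], PySem.List.pySetD st2.2 (i * W + j) (st2.1.length : Int)))
        (o, inv)
      = (o ++ cols.map (fun j => i * W + j),
         fillInv inv (o.length : Int) (cols.map (fun j => i * W + j))) := by
  induction cols with
  | nil => simp [fillInv]
  | cons c cs ih =>
      intro o inv
      simp only [List.foldl_cons, List.map_cons, fillInv]
      rw [ih]
      simp [Int.add_comm]

theorem sassRowB_eq (W : Int) (o d inv : List Int) (i : Int) (l2r : Bool) :
    sassRowB W (o, d, inv) (i, l2r)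
      = (o ++ ((if l2r then PySem.List.pyRange 0 W 1 else (PySem.List.pyRange 0 W 1).reverse).map (fun j => i * W + j)),
         d ++ List.replicate (W - 1).toNat (if l2r then 1 else 2) ++ [3],
         fillInv inv (o.length : Int)
           ((if l2r then PySem.List.pyRange 0 W 1 else (PySem.List.pyRange 0 W 1).reverse).map (fun j => i * W + j))) := by
  simp only [sassRowB]
  rw [sassRowB_inner]

-- A's loop 1, traversing one row rightwards from column j (j + n = W - 1)
theorem loop1_right (H W i : Int) :
    ∀ (n : Nat) (j : Int) (o d inv : List Int), i < H → 0 ≤ j → j + (n : Int) = W - 1 →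
      sassLoop1 H W i j true o d inv
        = sassLoop1 H W (i + 1) (W - 1) false
            (o ++ (PySem.List.pyRange j W 1).map (fun c => i * W + c))
            (d ++ List.replicate n 1 ++ [3])
            (fillInv inv (o.length : Int) ((PySem.List.pyRange j W 1).map (fun c => i * W + c))) := by
  intro n
  induction n with
  | zero =>
      intro j o d inv hi hj hjn
      have hW : W = j + 1 := by push_cast at hjn; omega
      subst hW
      rw [loop1_rb H _ i j o d inv hi (by omega)]
      rw [PySem.List.pyRange_one_singleton]
      simp [fillInv]
  | succ n ih =>
      intro j o d inv hi hj hjn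
      push_cast at hjn
      rw [loop1_rc H W i j o d inv hi (by omega)]
      rw [ih (j + 1) _ _ _ hi (by omega) (by push_cast; omega)]
      rw [PySem.List.pyRange_one_cons (by omega : j < W)]
      simp [fillInv, List.replicate_succ]

-- A's loop 1, traversing one row leftwards from column j = n down to 0
theorem loop1_left (H W i : Int) :
    ∀ (n : Nat) (j : Int) (o d inv : List Int), i < H → j = (n : Int) →
      sassLoop1 H W i j false o d inv
        = sassLoop1 H W (i + 1) 0 true
            (o ++ ((PySem.List.pyRange 0 (j + 1) 1).reverse).map (fun c => i * W + c))
            (d ++ List.replicate n 2 ++ [3])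
            (fillInv inv (o.length : Int) (((PySem.List.pyRange 0 (j + 1) 1).reverse).map (fun c => i * W + c))) := by
  intro n
  induction n with
  | zero =>
      intro j o d inv hi hj
      have hj0 : j = 0 := by push_cast at hj; omega
      subst hj0
      rw [loop1_lb H W i 0 o d inv hi (by omega)]
      rw [PySem.List.pyRange_one_singleton]
      simp [fillInv]
  | succ n ih =>
      intro j o d inv hi hj
      push_cast at hj
      rw [loop1_lc H W i j o d inv hi (by omega)]
      rw [ih (j - 1) _ _ _ hi (by push_cast; omega)]
      have hsplit : PySem.List.pyRange 0 (j + 1) 1 = PySem.List.pyRange 0 j 1 ++ [j] := by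
        have := PySem.List.pyRange_one_succ_right (a := 0) (b := j) (by omega)
        simpa using this
      rw [hsplit]
      have hj1 : j - 1 + 1 = j := by omega
      rw [hj1]
      simp [fillInv, List.replicate_succ]

-- A's loop 2, one row rightwards / leftwards (i decreasing)
theorem loop2_right (H W i : Int) :
    ∀ (n : Nat) (j : Int) (o d inv : List Int), i > -1 → 0 ≤ j → j + (n : Int) = W - 1 →
      sassLoop2 H W i j true o d inv
        = sassLoop2 H W (i - 1) (W - 1) false
            (o ++ (PySem.List.pyRange j W 1).map (fun c => i * W + c))
            (d ++ List.replicate n 1 ++ [3])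
            (fillInv inv (o.length : Int) ((PySem.List.pyRange j W 1).map (fun c => i * W + c))) := by
  intro n
  induction n with
  | zero =>
      intro j o d inv hi hj hjn
      have hW : W = j + 1 := by push_cast at hjn; omega
      subst hW
      rw [loop2_rb H _ i j o d inv hi (by omega)]
      rw [PySem.List.pyRange_one_singleton]
      simp [fillInv]
  | succ n ih =>
      intro j o d inv hi hj hjn
      push_cast at hjn
      rw [loop2_rc H W i j o d inv hi (by omega)]
      rw [ih (j + 1) _ _ _ hi (by omega) (by push_cast; omega)]
      rw [PySem.List.pyRange_one_cons (by omega : j < W)]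
      simp [fillInv, List.replicate_succ]

theorem loop2_left (H W i : Int) :
    ∀ (n : Nat) (j : Int) (o d inv : List Int), i > -1 → j = (n : Int) →
      sassLoop2 H W i j false o d inv
        = sassLoop2 H W (i - 1) 0 true
            (o ++ ((PySem.List.pyRange 0 (j + 1) 1).reverse).map (fun c => i * W + c))
            (d ++ List.replicate n 2 ++ [3])
            (fillInv inv (o.length : Int) (((PySem.List.pyRange 0 (j + 1) 1).reverse).map (fun c => i * W + c))) := by
  intro n
  induction n with
  | zero =>
      intro j o d inv hi hj
      have hj0 : j = 0 := by push_cast at hj; omega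
      subst hj0
      rw [loop2_lb H W i 0 o d inv hi (by omega)]
      rw [PySem.List.pyRange_one_singleton]
      simp [fillInv]
  | succ n ih =>
      intro j o d inv hi hj
      push_cast at hj
      rw [loop2_lc H W i j o d inv hi (by omega)]
      rw [ih (j - 1) _ _ _ hi (by push_cast; omega)]
      have hsplit : PySem.List.pyRange 0 (j + 1) 1 = PySem.List.pyRange 0 j 1 ++ [j] := by
        have := PySem.List.pyRange_one_succ_right (a := 0) (b := j) (by omega)
        simpa using this
      rw [hsplit]
      have hj1 : j - 1 + 1 = j := by omega
      rw [hj1]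
      simp [fillInv, List.replicate_succ]

-- A's loop 1 over all remaining rows i .. H-1 equals B's fold over those rows
theorem grid1 (H W : Int) (hW : 1 ≤ W) :
    ∀ (k : Nat) (i : Int) (o d inv : List Int), 0 ≤ i → i + (k : Int) = H →
      sassLoop1 H W i (if i % 2 == 0 then 0 else W - 1) (i % 2 == 0) o d inv
        = ((PySem.List.pyRange i H 1).map (fun r => (r, r % 2 == 0))).foldl (sassRowB W) (o, d, inv) := by
  intro k
  induction k with
  | zero =>
      intro i o d inv hi hk
      push_cast at hk
      rw [sassLoop1]
      rw [PySem.List.pyRange_one_eq_nil (by omega)]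
      simp only [List.map_nil, List.foldl_nil]
      rw [dif_neg (by omega)]
  | succ k ih =>
      intro i o d inv hi hk
      push_cast at hk
      have hiH : i < H := by omega
      rw [PySem.List.pyRange_one_cons hiH]
      simp only [List.map_cons, List.foldl_cons]
      rw [sassRowB_eq]
      have hW1 : ((W - 1).toNat : Int) = W - 1 := by omega
      by_cases hpar : i % 2 = 0
      · have hb : (i % 2 == 0) = true := by rw [beq_iff_eq]; omega
        rw [hb]
        simp only [if_pos trivial]
        rw [loop1_right H W i (W - 1).toNat 0 o d inv hiH le_rfl (by omega)]
        have h1 : ((i + 1) % 2 == 0) = false := by rw [beq_eq_false_iff_ne]; omega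
        have hIH := ih (i + 1)
          (o ++ (PySem.List.pyRange 0 W 1).map (fun c => i * W + c))
          (d ++ List.replicate (W - 1).toNat 1 ++ [3])
          (fillInv inv (o.length : Int) ((PySem.List.pyRange 0 W 1).map (fun c => i * W + c)))
          (by omega) (by push_cast; omega)
        rw [h1] at hIH
        simp only [Bool.false_eq_true, if_neg not_false] at hIH
        simpa using hIH
      · have hb : (i % 2 == 0) = false := by rw [beq_eq_false_iff_ne]; omega
        rw [hb]
        simp only [Bool.false_eq_true, if_neg not_false]
        rw [show W - 1 = ((W - 1).toNat : Int) from hW1.symm]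
        rw [loop1_left H W i (W - 1).toNat ((W - 1).toNat : Int) o d inv hiH rfl]
        rw [hW1]
        have hWW : W - 1 + 1 = W := by omega
        rw [hWW]
        have h1 : ((i + 1) % 2 == 0) = true := by rw [beq_iff_eq]; omega
        have hIH := ih (i + 1)
          (o ++ ((PySem.List.pyRange 0 W 1).reverse).map (fun c => i * W + c))
          (d ++ List.replicate (W - 1).toNat 2 ++ [3])
          (fillInv inv (o.length : Int) (((PySem.List.pyRange 0 W 1).reverse).map (fun c => i * W + c)))
          (by omega) (by push_cast; omega)
        rw [h1] at hIH
        simp only [if_pos trivial] at hIH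
        simpa using hIH

-- A's loop 2 over rows i down to 0 equals B's fold over those rows (top row last)
theorem grid2 (H W : Int) (hW : 1 ≤ W) :
    ∀ (k : Nat) (i : Int) (o d inv : List Int), i + 1 = (k : Int) →
      sassLoop2 H W i (if i % 2 == 1 then 0 else W - 1) (i % 2 == 1) o d inv
        = (((PySem.List.pyRange 0 (i + 1) 1).reverse).map (fun r => (r, r % 2 == 1))).foldl (sassRowB W) (o, d, inv) := by
  intro k
  induction k with
  | zero =>
      intro i o d inv hk
      push_cast at hk
      rw [sassLoop2]
      rw [PySem.List.pyRange_one_eq_nil (by omega)]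
      simp only [List.reverse_nil, List.map_nil, List.foldl_nil]
      rw [dif_neg (by omega)]
  | succ k ih =>
      intro i o d inv hk
      push_cast at hk
      have hi : i > -1 := by omega
      have hsplit : PySem.List.pyRange 0 (i + 1) 1 = PySem.List.pyRange 0 i 1 ++ [i] := by
        have := PySem.List.pyRange_one_succ_right (a := 0) (b := i) (by omega)
        simpa using this
      rw [hsplit]
      simp only [List.reverse_append, List.reverse_cons, List.reverse_nil, List.nil_append,
        List.cons_append, List.map_cons, List.foldl_cons]
      rw [sassRowB_eq]
      have hW1 : ((W - 1).toNat : Int) = W - 1 := by omega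
      by_cases hpar : i % 2 = 1
      · have hb : (i % 2 == 1) = true := by rw [beq_iff_eq]; omega
        rw [hb]
        simp only [if_pos trivial]
        rw [loop2_right H W i (W - 1).toNat 0 o d inv hi le_rfl (by omega)]
        have h1 : ((i - 1) % 2 == 1) = false := by rw [beq_eq_false_iff_ne]; omega
        have hIH := ih (i - 1)
          (o ++ (PySem.List.pyRange 0 W 1).map (fun c => i * W + c))
          (d ++ List.replicate (W - 1).toNat 1 ++ [3])
          (fillInv inv (o.length : Int) ((PySem.List.pyRange 0 W 1).map (fun c => i * W + c)))
          (by push_cast; omega)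
        rw [h1] at hIH
        simp only [Bool.false_eq_true, if_neg not_false] at hIH
        have hii : i - 1 + 1 = i := by omega
        rw [hii] at hIH
        simpa using hIH
      · have hb : (i % 2 == 1) = false := by rw [beq_eq_false_iff_ne]; omega
        rw [hb]
        simp only [Bool.false_eq_true, if_neg not_false]
        rw [show W - 1 = ((W - 1).toNat : Int) from hW1.symm]
        rw [loop2_left H W i (W - 1).toNat ((W - 1).toNat : Int) o d inv hi rfl]
        rw [hW1]
        have hWW : W - 1 + 1 = W := by omega
        rw [hWW]
        have h1 : ((i - 1) % 2 == 1) = true := by rw [beq_iff_eq]; omega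
        have hIH := ih (i - 1)
          (o ++ ((PySem.List.pyRange 0 W 1).reverse).map (fun c => i * W + c))
          (d ++ List.replicate (W - 1).toNat 2 ++ [3])
          (fillInv inv (o.length : Int) (((PySem.List.pyRange 0 W 1).reverse).map (fun c => i * W + c)))
          (by push_cast; omega)
        rw [h1] at hIH
        simp only [if_pos trivial] at hIH
        have hii : i - 1 + 1 = i := by omega
        rw [hii] at hIH
        simpa using hIH

-- Python's % agrees with Lean's emod for the positive divisor 2
theorem pymod_two (i : Int) : PySem.Int.mod i 2 = i % 2 :=
  PySem.Int.mod_eq_emod_of_pos (by norm_num)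

-- ===== VERDICT (by name: the statement is the Claim_ definition above) =====
theorem sass_hor_spec : Claim_equal_sass_hor := by
  unfold Claim_equal_sass_hor Spec_sass_hor Pre_sass_hor
  rintro ⟨H, W⟩ _ hpre
  show sass_hor (H, W) = sass_hor_alt (H, W)
  simp only [sass_hor, sass_hor_alt, sassBuild, pymod_two]
  by_cases hH : H ≤ 0
  · rw [PySem.List.pyRange_one_eq_nil (by omega)]
    rw [sassLoop1, dif_neg (by omega)]
    by_cases hodd : (H % 2 == 1) = true
    · simp only [if_pos hodd]
      rw [sassLoop2, dif_neg (by omega)]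
      simp
    · simp only [if_neg hodd]
      rw [sassLoop2, dif_neg (by omega)]
      simp
  · have hH1 : 1 ≤ H := by omega
    have hW : 1 ≤ W := by simp at hpre; omega
    have hg1 := grid1 H W hW H.toNat 0 [] [] (List.replicate (H * W).toNat (-1 : Int))
      le_rfl (by omega)
    rw [show ((0 : Int) % 2 == 0) = true from by decide] at hg1
    simp only [if_pos trivial] at hg1
    have hg2 := grid2 H W hW H.toNat (H - 1) [] [] (List.replicate (H * W).toNat (-1 : Int))
      (by omega)
    rw [show H - 1 + 1 = H from by omega] at hg2
    rw [hg1]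
    by_cases hodd : H % 2 = 1
    · rw [show ((H - 1) % 2 == 1) = false from by rw [beq_eq_false_iff_ne]; omega] at hg2
      simp only [Bool.false_eq_true, if_neg not_false] at hg2
      rw [show (H % 2 == 1) = true from by rw [beq_iff_eq]; exact hodd]
      simp only [if_pos trivial]
      rw [hg2]
    · rw [show ((H - 1) % 2 == 1) = true from by rw [beq_iff_eq]; omega] at hg2
      simp only [if_pos trivial] at hg2
      rw [show (H % 2 == 1) = false from by rw [beq_eq_false_iff_ne]; omega]
      simp only [Bool.false_eq_true, if_neg not_false]
      rw [hg2]
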